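-- pv_equiv track=rewrite | github.com/BoBoBoB-Gang/BoBoBoB-Algorithm-Club | week01/15685_jiyoon.py | dc_move
-- ===== SOURCE A (Python) =====
-- def spin(d):
--     if d[1] != 0:
--         return (-d[1], d[0])
--     else:
--         return (d[1], d[0])
--
-- def dc_move(n):
--     dif = ((n[-2][0] - n[-1][0]), (n[-2][1] - n[-1][1]))
--     spin_dif = spin(dif)
--     spinned = ((n[-1][0] + spin_dif[0]), (n[-1][1] + spin_dif[1]))
--
--     if len(n) >= 3:
--         new_coord_array = [spinned]
--         for i in range(len(n)-3,-1,-1):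
--             dif = ((n[i][0] - n[i+1][0]), (n[i][1] - n[i+1][1]))
--             spin_dif = spin(dif)
--             new_coord = ((new_coord_array[-1][0] + spin_dif[0]), (new_coord_array[-1][1] + spin_dif[1]))
--             new_coord_array.append(new_coord)
--
--         n += new_coord_array
--
--     else:
--         n.append(spinned)
--
--     return n
-- ===== SOURCE B (Python) =====
-- def dc_move(n):
--     p = n[-1]
--     px, py = p
--     n += [(px - (n[i][1] - py), py + (n[i][0] - px)) for i in range(len(n) - 2, -1, -1)]
--     return n
-- ===== Notes on version B (the rewrite author's own statement) =====
-- stated objective: simpler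
-- what changed: B replaces A's incremental difference-accumulation loop (spin each consecutive difference, append to a growing array whose last element is reread each step, plus a special len<3 branch) by the closed-form reflection: each new point is pivot + rot90(point - pivot), computed independently per index in one comprehension.
import Mathlib
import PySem

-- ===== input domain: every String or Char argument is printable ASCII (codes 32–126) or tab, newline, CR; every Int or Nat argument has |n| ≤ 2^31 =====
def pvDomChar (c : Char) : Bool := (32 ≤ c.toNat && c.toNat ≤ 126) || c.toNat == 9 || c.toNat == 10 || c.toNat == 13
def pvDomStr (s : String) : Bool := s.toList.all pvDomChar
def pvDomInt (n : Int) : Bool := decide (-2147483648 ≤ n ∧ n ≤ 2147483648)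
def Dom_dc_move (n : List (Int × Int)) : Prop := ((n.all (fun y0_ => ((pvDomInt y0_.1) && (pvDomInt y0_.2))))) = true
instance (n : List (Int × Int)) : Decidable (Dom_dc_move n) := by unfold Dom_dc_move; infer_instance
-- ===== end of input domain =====

-- B computes each new point directly as pivot + 90°-rotation of (point - pivot) instead of
-- accumulating rotated consecutive differences; simpler (no accumulator, no length-3 split).
-- Both Pythons mutate n in place identically (n += … / n.append); equivalence here is about the return value.

-- ===== PORT A =====
-- n[i] (possibly negative i); getD only fires where Python would raise IndexError (outside Pre_)
def pvIdx (n : List (Int × Int)) (i : Int) : Int × Int :=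
  (PySem.List.pyGet? n i).getD (0, 0)

def pvSpin (d : Int × Int) : Int × Int :=
  if d.2 ≠ 0 then (-d.2, d.1) else (d.2, d.1)

def dc_move (n : List (Int × Int)) : List (Int × Int) :=
  let dif := ((pvIdx n (-2)).1 - (pvIdx n (-1)).1, (pvIdx n (-2)).2 - (pvIdx n (-1)).2)
  let spin_dif := pvSpin dif
  let spinned := ((pvIdx n (-1)).1 + spin_dif.1, (pvIdx n (-1)).2 + spin_dif.2)
  if 3 ≤ n.length then
    let arr := (PySem.List.pyRange ((n.length : Int) - 3) (-1) (-1)).foldl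
      (fun acc i =>
        let dif := ((pvIdx n i).1 - (pvIdx n (i+1)).1, (pvIdx n i).2 - (pvIdx n (i+1)).2)
        let sd := pvSpin dif
        let last := acc.getLast?.getD (0, 0)
        acc ++ [(last.1 + sd.1, last.2 + sd.2)]) [spinned]
    n ++ arr
  else
    n ++ [spinned]

-- ===== PORT B =====
def dc_move_alt (n : List (Int × Int)) : List (Int × Int) :=
  let p := (PySem.List.pyGet? n (-1)).getD (0, 0)
  n ++ (PySem.List.pyRange ((n.length : Int) - 2) (-1) (-1)).map
    (fun i =>
      let q := (PySem.List.pyGet? n i).getD (0, 0)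
      (p.1 - (q.2 - p.2), p.2 + (q.1 - p.1)))

-- ===== PRECONDITION & SPEC =====
-- A raises IndexError (n[-2] or n[-1]) exactly when len(n) < 2.
def Pre_dc_move (n : List (Int × Int)) : Prop := 2 ≤ n.length
instance (n : List (Int × Int)) : Decidable (Pre_dc_move n) := by unfold Pre_dc_move; infer_instance
def pvWitness_dc_move : (List (Int × Int)) := [(0, 0), (1, 0)]

def Spec_dc_move (n : List (Int × Int)) (out : List (Int × Int)) : Prop := out = dc_move_alt n
instance (n : List (Int × Int)) (out : List (Int × Int)) : Decidable (Spec_dc_move n out) := by unfold Spec_dc_move; infer_instance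

-- ===== CLAIM (what is proved, stated in full; the proofs are below) =====
def Claim_equal_dc_move : Prop := ∀ (n : List (Int × Int)), Dom_dc_move n → Pre_dc_move n → Spec_dc_move n (dc_move n)

-- ===== LEMMAS AND PROOFS =====

-- spin is always the 90° rotation (the else branch has d.2 = 0, so (d.2, d.1) = (-d.2, d.1))
theorem pvSpin_eq (d : Int × Int) : pvSpin d = (-d.2, d.1) := by
  unfold pvSpin; split_ifs with h
  · rfl
  · simp at h; simp [h]

-- the closed-form new point for index i, with pivot p = n[-1]
def pvF (n : List (Int × Int)) (i : Int) : Int × Int :=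
  let p := (PySem.List.pyGet? n (-1)).getD (0, 0)
  let q := (PySem.List.pyGet? n i).getD (0, 0)
  (p.1 - (q.2 - p.2), p.2 + (q.1 - p.1))

-- one fold step from an accumulator ending in pvF n (i+1) appends pvF n i
theorem pvStep_eq (n : List (Int × Int)) (acc0 : List (Int × Int)) (i : Int) :
    (let dif := ((pvIdx n i).1 - (pvIdx n (i+1)).1, (pvIdx n i).2 - (pvIdx n (i+1)).2)
     let sd := pvSpin dif
     let last := (acc0 ++ [pvF n (i+1)]).getLast?.getD (0, 0)
     acc0 ++ [pvF n (i+1)] ++ [(last.1 + sd.1, last.2 + sd.2)])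
      = acc0 ++ [pvF n (i+1)] ++ [pvF n i] := by
  simp [pvSpin_eq, pvF, pvIdx]
  constructor <;> ring

-- the fold over range(k-1, -1, -1) starting from …++[pvF n k] produces …++ map (pvF n) over range(k, -1, -1)
theorem pvFold_eq (n : List (Int × Int)) : ∀ (k : Nat) (acc0 : List (Int × Int)),
    (PySem.List.pyRange ((k : Int) - 1) (-1) (-1)).foldl
      (fun acc j =>
        let dif := ((pvIdx n j).1 - (pvIdx n (j+1)).1, (pvIdx n j).2 - (pvIdx n (j+1)).2)
        let sd := pvSpin dif
        let last := acc.getLast?.getD (0, 0)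
        acc ++ [(last.1 + sd.1, last.2 + sd.2)]) (acc0 ++ [pvF n (k : Int)])
      = acc0 ++ (PySem.List.pyRange (k : Int) (-1) (-1)).map (pvF n) := by
  intro k
  induction k with
  | zero =>
      intro acc0
      rw [PySem.List.pyRange_neg_one_eq_nil (by norm_num)]
      rw [PySem.List.pyRange_neg_one_cons (by norm_num)]
      rw [PySem.List.pyRange_neg_one_eq_nil (by norm_num)]
      simp
  | succ k ih =>
      intro acc0
      have h1 : ((k : Int) + 1) - 1 = (k : Int) := by ring
      rw [show (((k : Nat) + 1 : Nat) : Int) = (k : Int) + 1 by push_cast; ring]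
      rw [h1]
      rw [PySem.List.pyRange_neg_one_cons (show (-1 : Int) < (k : Int) by omega)]
      rw [List.foldl_cons]
      rw [pvStep_eq n acc0 (k : Int)]
      rw [ih (acc0 ++ [pvF n ((k : Int) + 1)])]
      rw [PySem.List.pyRange_neg_one_cons (show (-1 : Int) < (k : Int) + 1 by omega)]
      simp

-- for len n ≥ 2, the "spinned" seed point is exactly pvF n (len n - 2)
theorem pvSpinned_eq (n : List (Int × Int)) (h : 2 ≤ n.length) :
    ((pvIdx n (-1)).1 + (pvSpin ((pvIdx n (-2)).1 - (pvIdx n (-1)).1, (pvIdx n (-2)).2 - (pvIdx n (-1)).2)).1,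
     (pvIdx n (-1)).2 + (pvSpin ((pvIdx n (-2)).1 - (pvIdx n (-1)).1, (pvIdx n (-2)).2 - (pvIdx n (-1)).2)).2)
      = pvF n ((n.length : Int) - 2) := by
  have h2 : PySem.List.pyGet? n (-2) = PySem.List.pyGet? n ((n.length : Int) - 2) := by
    rw [PySem.List.pyGet?_neg_ofNat n 2 (by omega) (by omega)]
    rw [show ((n.length : Int) - 2) = ((n.length - 2 : Nat) : Int) by omega]
    rw [PySem.List.pyGet?_natCast]
  simp only [pvF, pvIdx, pvSpin_eq, h2]
  refine Prod.ext ?_ ?_ <;> simp <;> ring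

theorem dc_move_eq (n : List (Int × Int)) (h : 2 ≤ n.length) : dc_move n = dc_move_alt n := by
  unfold dc_move dc_move_alt
  simp only []
  by_cases h3 : 3 ≤ n.length
  · rw [if_pos h3]
    have hfold := pvFold_eq n (n.length - 2) []
    have hc1 : (((n.length - 2 : Nat) : Int)) - 1 = (n.length : Int) - 3 := by omega
    have hc2 : (((n.length - 2 : Nat) : Int)) = (n.length : Int) - 2 := by omega
    rw [hc1, hc2] at hfold
    rw [show ([((pvIdx n (-1)).1 + (pvSpin ((pvIdx n (-2)).1 - (pvIdx n (-1)).1, (pvIdx n (-2)).2 - (pvIdx n (-1)).2)).1,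
          (pvIdx n (-1)).2 + (pvSpin ((pvIdx n (-2)).1 - (pvIdx n (-1)).1, (pvIdx n (-2)).2 - (pvIdx n (-1)).2)).2)] : List (Int × Int))
        = [] ++ [pvF n ((n.length : Int) - 2)] by simp [pvSpinned_eq n h]]
    rw [hfold]
    simp [pvF]
  · rw [if_neg h3]
    have hm : n.length = 2 := by omega
    have hr : PySem.List.pyRange ((n.length : Int) - 2) (-1) (-1) = [0] := by
      rw [hm]; norm_num
      rw [PySem.List.pyRange_neg_one_cons (by norm_num)]
      rw [PySem.List.pyRange_neg_one_eq_nil (by norm_num)]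
    rw [hr]
    have hs := pvSpinned_eq n h
    rw [hm] at hs
    norm_num at hs
    simp only [List.map_cons, List.map_nil]
    rw [hs]
    simp [pvF]

-- ===== VERDICT (by name: the statement is the Claim_ definition above) =====
theorem dc_move_spec : Claim_equal_dc_move := by
  intro n _ hpre
  unfold Spec_dc_move
  exact dc_move_eq n hpre
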